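-- pv_equiv track=rewrite | github.com/zhoulytwinyu/coverage-py | coverage/coverage.py | get_coverages_bisect
-- ===== SOURCE A (Python) =====
-- from bisect import bisect_left, bisect_right
--
-- def get_coverages_bisect(loci,reads):
--   sorted_starts = sorted([r["start"] for r in reads])
--   sorted_ends = sorted([r["end"] for r in reads])
--   ret = []
--   for l in loci:
--     p=l["position"]
--     count_right = len(reads)-bisect_right(sorted_starts,p)
--     # This is such that s<=p for all s in starts[0:right]
--     # To programmatically test this, uncomment:
--     # assert all([s<=p for s in starts[:right]])
--     count_left = bisect_right(sorted_ends,p)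
--     count = len(reads)-count_left-count_right
--     ret.append(count)
--   return ret
-- ===== SOURCE B (Python) =====
-- def get_coverages_bisect(loci, reads):
--     # coverage at p = (# reads started by p) - (# reads ended by p)
--     ret = []
--     for l in loci:
--         p = l["position"]
--         started = sum(1 for r in reads if r["start"] <= p)
--         ended = sum(1 for r in reads if r["end"] <= p)
--         ret.append(started - ended)
--     return ret
-- ===== Notes on version B (the rewrite author's own statement) =====
-- stated objective: simpler
-- what changed: Replaced the sort-both-endpoint-lists-and-binary-search scheme by a direct sweep count per locus: coverage at p is the number of reads with start <= p minus the number with end <= p, computed by plain scans with no sorting and no bisect.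
import Mathlib
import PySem

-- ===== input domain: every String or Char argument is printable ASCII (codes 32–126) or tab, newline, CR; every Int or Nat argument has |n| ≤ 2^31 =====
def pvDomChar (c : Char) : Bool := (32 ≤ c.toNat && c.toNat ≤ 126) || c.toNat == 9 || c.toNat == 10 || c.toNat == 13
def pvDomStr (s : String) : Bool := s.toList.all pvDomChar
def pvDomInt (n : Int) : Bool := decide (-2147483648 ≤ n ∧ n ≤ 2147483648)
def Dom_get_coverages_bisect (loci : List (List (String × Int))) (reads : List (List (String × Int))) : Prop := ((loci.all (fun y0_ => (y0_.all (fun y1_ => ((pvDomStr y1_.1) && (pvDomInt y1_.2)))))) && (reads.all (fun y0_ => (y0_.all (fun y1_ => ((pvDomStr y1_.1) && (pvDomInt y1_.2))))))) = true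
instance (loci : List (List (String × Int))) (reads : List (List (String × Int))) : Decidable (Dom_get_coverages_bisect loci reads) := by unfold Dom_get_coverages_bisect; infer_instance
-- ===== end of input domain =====

-- B replaces the sort-plus-bisect index by a direct per-locus sweep count
-- (#reads with start <= p minus #reads with end <= p); objective: simpler.


-- ===== PORT A =====
-- d[k] on an association list: first match; default 0 is never reached inside
-- Pre_ (a missing key is Python's KeyError, excluded by Pre_).
def fieldD (d : List (String × Int)) (k : String) : Int :=
  (((d.find? (fun kv => kv.1 == k)).map Prod.snd).getD 0)

def get_coverages_bisect (loci : List (List (String × Int))) (reads : List (List (String × Int))) : List Int :=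
  let sorted_starts := PySem.List.sorted (reads.map (fun r => fieldD r "start")) (fun x => x) false
  let sorted_ends := PySem.List.sorted (reads.map (fun r => fieldD r "end")) (fun x => x) false
  loci.foldl (fun ret l =>
    let p := fieldD l "position"
    let count_right : Int := (reads.length : Int) - (PySem.List.bisectRight sorted_starts p : Int)
    let count_left : Int := (PySem.List.bisectRight sorted_ends p : Int)
    let count : Int := (reads.length : Int) - count_left - count_right
    ret ++ [count]) []

-- ===== PORT B =====
def get_coverages_bisect_alt (loci : List (List (String × Int))) (reads : List (List (String × Int))) : List Int :=
  loci.foldl (fun ret l =>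
    let p := fieldD l "position"
    let started : Int := (reads.countP (fun r => fieldD r "start" ≤ p) : Int)
    let ended : Int := (reads.countP (fun r => fieldD r "end" ≤ p) : Int)
    ret ++ [started - ended]) []

-- ===== PRECONDITION & SPEC =====
-- Pre_ excludes exactly the inputs on which Python A raises KeyError: a locus
-- without a "position" key or a read without a "start" or "end" key.
def Pre_get_coverages_bisect (loci : List (List (String × Int))) (reads : List (List (String × Int))) : Prop :=
  (∀ l ∈ loci, l.any (fun kv => kv.1 == "position") = true) ∧
  (∀ r ∈ reads, r.any (fun kv => kv.1 == "start") = true ∧ r.any (fun kv => kv.1 == "end") = true)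
instance (loci : List (List (String × Int))) (reads : List (List (String × Int))) : Decidable (Pre_get_coverages_bisect loci reads) := by unfold Pre_get_coverages_bisect; infer_instance

def pvWitness_get_coverages_bisect : (List (List (String × Int))) × (List (List (String × Int))) :=
  ([[("position", 1)]], [[("start", 0), ("end", 2)], [("start", 2), ("end", 3)]])

def Spec_get_coverages_bisect (loci : List (List (String × Int))) (reads : List (List (String × Int))) (out : List Int) : Prop := out = get_coverages_bisect_alt loci reads
instance (loci : List (List (String × Int))) (reads : List (List (String × Int))) (out : List Int) : Decidable (Spec_get_coverages_bisect loci reads out) := by unfold Spec_get_coverages_bisect; infer_instance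

-- ===== CLAIM (what is proved, stated in full; the proofs are below) =====
def Claim_equal_get_coverages_bisect : Prop := ∀ (loci : List (List (String × Int))) (reads : List (List (String × Int))), Dom_get_coverages_bisect loci reads → Pre_get_coverages_bisect loci reads → Spec_get_coverages_bisect loci reads (get_coverages_bisect loci reads)

-- ===== LEMMAS AND PROOFS =====

-- bisect_right on a (≤-)sorted list is the number of elements ≤ p.
theorem bisectRight_eq_countP (ys : List Int) (p : Int)
    (h : ys.Pairwise (fun a b => a ≤ b)) :
    PySem.List.bisectRight ys p = ys.countP (fun x => decide (x ≤ p)) := by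
  obtain ⟨hk, hlo, hhi⟩ := PySem.List.bisectRight_spec ys p h
  set k := PySem.List.bisectRight ys p with hkdef
  have hsplit : ys.countP (fun x => decide (x ≤ p)) =
      (ys.take k).countP (fun x => decide (x ≤ p)) + (ys.drop k).countP (fun x => decide (x ≤ p)) := by
    conv_lhs => rw [← List.take_append_drop k ys]
    exact List.countP_append
  have htake : (ys.take k).countP (fun x => decide (x ≤ p)) = k := by
    have hall : ∀ a ∈ ys.take k, (fun x => decide (x ≤ p)) a = true := by
      intro a ha
      obtain ⟨j, hj, hget⟩ := List.mem_take_iff_getElem.mp ha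
      have hj' : j < ys.length := (lt_min_iff.mp hj).2
      simpa [← hget] using hlo j hj' (lt_min_iff.mp hj).1
    have hlen : (ys.take k).length = k := by
      simp [List.length_take, Nat.min_eq_left hk]
    rw [List.countP_eq_length.mpr hall, hlen]
  have hdrop : (ys.drop k).countP (fun x => decide (x ≤ p)) = 0 := by
    apply List.countP_eq_zero.mpr
    intro a ha
    obtain ⟨j, hj, hget⟩ := List.mem_drop_iff_getElem.mp ha
    have := hhi (k + j) (by omega) (by omega)
    simp only [← hget]
    simpa using this
  omega

-- the per-locus value A appends equals the sweep count B appends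
theorem perLocus (reads : List (List (String × Int))) (p : Int) (key : String) :
    (PySem.List.bisectRight (PySem.List.sorted (reads.map (fun r => fieldD r key)) (fun x => x) false) p : Int)
      = (reads.countP (fun r => fieldD r key ≤ p) : Int) := by
  have hpw : (PySem.List.sorted (reads.map (fun r => fieldD r key)) (fun x => x) false).Pairwise
      (fun a b => a ≤ b) := by
    simpa using PySem.List.sorted_pairwise (xs := reads.map (fun r => fieldD r key))
      (key := fun x => x)
  rw [bisectRight_eq_countP _ p hpw,
    List.Perm.countP_eq _ (PySem.List.sorted_perm _ _ _), List.countP_map]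
  rfl

-- ===== VERDICT (by name: the statement is the Claim_ definition above) =====
theorem get_coverages_bisect_spec : Claim_equal_get_coverages_bisect := by
  intro loci reads _ _
  unfold Spec_get_coverages_bisect get_coverages_bisect get_coverages_bisect_alt
  simp only []
  rw [PySem.List.foldl_append_singleton_eq_map, PySem.List.foldl_append_singleton_eq_map]
  refine congrArg (List.map · loci) (funext fun l => ?_)
  rw [perLocus reads (fieldD l "position") "start", perLocus reads (fieldD l "position") "end"]
  have hs := List.countP_le_length (l := reads) (p := fun r => decide (fieldD r "start" ≤ fieldD l "position"))
  have he := List.countP_le_length (l := reads) (p := fun r => decide (fieldD r "end" ≤ fieldD l "position"))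
  omega
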